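-- pv_equiv track=rewrite | github.com/strongca22-cpu/utility-api | src/utility_api/ingest/ca_ewrims.py | _pick_category_group
-- ===== SOURCE A (Python) =====
-- CATEGORY_PRIORITY = [
--     "industrial",
--     "energy",
--     "municipal",
--     "mining",
--     "environmental",
--     "water_withdrawal",
--     "infrastructure",
--     "agricultural",
--     "commercial",
--     "other",
-- ]
--
-- def _pick_category_group(
--     use_codes: list[str], category_map: dict[str, str]
-- ) -> str:
--     """Pick the highest-priority category_group from a list of USE_CODEs.
--
--     Parameters
--     ----------
--     use_codes : list[str]
--         List of USE_CODEs for a water right.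
--     category_map : dict[str, str]
--         USE_CODE → category_group mapping.
--
--     Returns
--     -------
--     str
--         The highest-priority category_group.
--     """
--     groups = {category_map.get(uc, "other") for uc in use_codes}
--     for priority_group in CATEGORY_PRIORITY:
--         if priority_group in groups:
--             return priority_group
--     return "other"
-- ===== SOURCE B (Python) =====
-- CATEGORY_PRIORITY = [
--     "industrial",
--     "energy",
--     "municipal",
--     "mining",
--     "environmental",
--     "water_withdrawal",
--     "infrastructure",
--     "agricultural",
--     "commercial",
--     "other",
-- ]
--
-- def _pick_category_group(use_codes, category_map):
--     """Single pass keeping the minimum priority index seen (no set, no scan of CATEGORY_PRIORITY)."""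
--     priority_index = {g: i for i, g in enumerate(CATEGORY_PRIORITY)}
--     best = None
--     for uc in use_codes:
--         i = priority_index.get(category_map.get(uc, "other"))
--         if i is not None and (best is None or i < best):
--             best = i
--     return "other" if best is None else CATEGORY_PRIORITY[best]
-- ===== Notes on version B (the rewrite author's own statement) =====
-- stated objective: simpler
-- what changed: Replaced A's build-a-set-of-groups-then-scan-CATEGORY_PRIORITY with a precomputed group-to-index dict and a single pass over use_codes keeping the minimum priority index, returning CATEGORY_PRIORITY[best] (or 'other' if none).
import Mathlib
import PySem

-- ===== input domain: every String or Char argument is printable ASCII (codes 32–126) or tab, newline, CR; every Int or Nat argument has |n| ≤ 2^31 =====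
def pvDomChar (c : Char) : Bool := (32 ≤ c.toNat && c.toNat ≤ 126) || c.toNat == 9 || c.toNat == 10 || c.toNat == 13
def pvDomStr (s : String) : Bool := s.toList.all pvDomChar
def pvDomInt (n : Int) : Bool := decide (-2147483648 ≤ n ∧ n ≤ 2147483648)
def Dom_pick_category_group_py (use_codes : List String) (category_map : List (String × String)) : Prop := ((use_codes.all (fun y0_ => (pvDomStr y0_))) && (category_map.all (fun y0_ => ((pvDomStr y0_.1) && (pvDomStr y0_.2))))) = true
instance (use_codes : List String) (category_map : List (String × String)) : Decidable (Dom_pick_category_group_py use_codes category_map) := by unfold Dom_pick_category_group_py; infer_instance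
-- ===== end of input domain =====

-- B replaces A's set-then-priority-scan with a precomputed index dict and a single running-minimum pass (objective: simpler one-pass decomposition).

-- ===== PORT A =====
-- CATEGORY_PRIORITY (module constant)
def pvPriority : List String :=
  ["industrial", "energy", "municipal", "mining", "environmental",
   "water_withdrawal", "infrastructure", "agricultural", "commercial", "other"]

-- the 'for priority_group in CATEGORY_PRIORITY: if … return' loop, with early return
def pvALoop (ps : List String) (groups : PySem.Set String) : String :=
  match ps with
  | [] => "other"
  | p :: rest => if PySem.Set.contains groups p then p else pvALoop rest groups

def pick_category_group_py (use_codes : List String) (category_map : List (String × String)) : String :=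
  let groups : PySem.Set String :=
    PySem.Set.ofList (use_codes.map (fun uc => PySem.Dict.getD ⟨category_map⟩ uc "other"))
  pvALoop pvPriority groups

-- ===== PORT B =====
-- priority_index = {g: i for i, g in enumerate(CATEGORY_PRIORITY)}
def pvPriorityIndex : PySem.Dict String Int :=
  (PySem.List.enumerate pvPriority 0).foldl
    (fun d p => d.insert p.2 p.1) PySem.Dict.empty

-- the 'for uc in use_codes' loop, carrying 'best'
def pvBStep (category_map : List (String × String)) (best : Option Int) (uc : String) : Option Int :=
  match PySem.Dict.get? pvPriorityIndex (PySem.Dict.getD ⟨category_map⟩ uc "other"), best with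
  | none, b => b
  | some i, none => some i
  | some i, some b => if i < b then some i else some b

def pick_category_group_py_alt (use_codes : List String) (category_map : List (String × String)) : String :=
  match use_codes.foldl (pvBStep category_map) none with
  | none => "other"
  | some i =>
    match PySem.List.pyGet? pvPriority i with
    | some s => s
    | none => ""   -- unreachable: best is always a valid index

-- ===== PRECONDITION & SPEC =====
def Spec_pick_category_group_py (use_codes : List String) (category_map : List (String × String)) (out : String) : Prop := out = pick_category_group_py_alt use_codes category_map
instance (use_codes : List String) (category_map : List (String × String)) (out : String) : Decidable (Spec_pick_category_group_py use_codes category_map out) := by unfold Spec_pick_category_group_py; infer_instance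

-- ===== CLAIM (what is proved, stated in full; the proofs are below) =====
def Claim_equal_pick_category_group_py : Prop := ∀ (use_codes : List String) (category_map : List (String × String)), Dom_pick_category_group_py use_codes category_map → Spec_pick_category_group_py use_codes category_map (pick_category_group_py use_codes category_map)

-- ===== LEMMAS AND PROOFS =====

-- first element of ps that occurs in G (reference form of A's scan)
def pvFirstIn (ps G : List String) : String :=
  match ps with
  | [] => "other"
  | p :: rest => if p ∈ G then p else pvFirstIn rest G

-- index of s in ps (reference form of B's dict lookup)
def pvIdxN (ps : List String) (s : String) : Option Nat :=
  match ps with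
  | [] => none
  | p :: rest => if p = s then some 0 else (pvIdxN rest s).map (· + 1)

-- running-minimum step over Nat indices (reference form of B's loop body)
def pvNStep (ps : List String) (b : Option Nat) (x : String) : Option Nat :=
  match pvIdxN ps x, b with
  | none, b => b
  | some i, none => some i
  | some i, some j => if i < j then some i else some j

def pvFinish (ps : List String) (o : Option Nat) : String :=
  match o with
  | none => "other"
  | some n => (ps[n]?).getD "other"

theorem pvALoop_eq_firstIn (ps G : List String) :
    pvALoop ps (PySem.Set.ofList G) = pvFirstIn ps G := by
  induction ps with
  | nil => rfl
  | cons p rest ih =>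
    simp only [pvALoop, pvFirstIn, ih]
    by_cases h : p ∈ G
    · rw [if_pos, if_pos h]
      exact (PySem.Set.contains_iff _ _).mpr ((PySem.Set.mem_ofList G p).mpr h)
    · rw [if_neg, if_neg h]
      intro hc
      exact h ((PySem.Set.mem_ofList G p).mp ((PySem.Set.contains_iff _ _).mp hc))

set_option maxHeartbeats 2000000 in
theorem pvIndex_eq (s : String) :
    PySem.Dict.get? pvPriorityIndex s = (pvIdxN pvPriority s).map Int.ofNat := by
  have h : pvPriorityIndex = PySem.Dict.mk
      [("industrial", 0), ("energy", 1), ("municipal", 2), ("mining", 3), ("environmental", 4),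
       ("water_withdrawal", 5), ("infrastructure", 6), ("agricultural", 7), ("commercial", 8),
       ("other", 9)] := by rfl
  rw [h]
  simp only [PySem.Dict.get?_mk_cons, pvIdxN, pvPriority, beq_iff_eq]
  split_ifs <;> rfl

-- B's Int fold mirrors the Nat fold
theorem pvBStep_eq_cast (category_map : List (String × String)) (b : Option Nat) (uc : String) :
    pvBStep category_map (b.map Int.ofNat) uc
      = (pvNStep pvPriority b (PySem.Dict.getD ⟨category_map⟩ uc "other")).map Int.ofNat := by
  unfold pvBStep pvNStep
  rw [pvIndex_eq]
  cases pvIdxN pvPriority (PySem.Dict.getD ⟨category_map⟩ uc "other") with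
  | none => cases b <;> rfl
  | some i =>
    cases b with
    | none => rfl
    | some j =>
      simp only [Option.map_some]
      show (if Int.ofNat i < Int.ofNat j then some (Int.ofNat i) else some (Int.ofNat j))
          = ((if i < j then some i else some j).map Int.ofNat)
      by_cases hij : i < j <;> simp [hij, Int.ofNat_eq_natCast]

theorem pvBFold_eq_cast (category_map : List (String × String)) (use_codes : List String) (b : Option Nat) :
    use_codes.foldl (pvBStep category_map) (b.map Int.ofNat)
      = ((use_codes.map (fun uc => PySem.Dict.getD ⟨category_map⟩ uc "other")).foldl
          (pvNStep pvPriority) b).map Int.ofNat := by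
  induction use_codes generalizing b with
  | nil => rfl
  | cons uc rest ih =>
    simp only [List.foldl, List.map, pvBStep_eq_cast]
    exact ih _

-- empty priority list: the fold is the identity
theorem pvNFold_nil (G : List String) (b : Option Nat) :
    G.foldl (pvNStep []) b = b := by
  induction G generalizing b with
  | nil => rfl
  | cons x G ih => simp only [List.foldl, pvNStep, pvIdxN]; exact ih b

-- once the minimum is 0 it stays 0
theorem pvNFold_zero_abs (ps : List String) (G : List String) :
    G.foldl (pvNStep ps) (some 0) = some 0 := by
  induction G with
  | nil => rfl
  | cons x G ih =>
    simp only [List.foldl]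
    have : pvNStep ps (some 0) x = some 0 := by
      unfold pvNStep
      cases pvIdxN ps x with
      | none => rfl
      | some i => simp
    rw [this, ih]

theorem pvNFold_zero (p : String) (ps' G : List String) (b : Option Nat) (hp : p ∈ G) :
    G.foldl (pvNStep (p :: ps')) b = some 0 := by
  induction G generalizing b with
  | nil => cases hp
  | cons x G ih =>
    simp only [List.foldl]
    by_cases hx : p = x
    · have hstep : pvNStep (p :: ps') b x = some 0 := by
        unfold pvNStep pvIdxN
        rw [if_pos hx]
        cases b with
        | none => rfl
        | some j =>
          by_cases hj : 0 < j
          · simp [hj]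
          · simp [Nat.le_zero.mp (Nat.not_lt.mp hj)]
      rw [hstep, pvNFold_zero_abs]
    · have : p ∈ G := by
        rcases List.mem_cons.mp hp with h | h
        · exact absurd h hx
        · exact h
      exact ih _ this

-- if the head never occurs in G the fold just shifts all indices by one
theorem pvNFold_shift (p : String) (ps' G : List String) (b : Option Nat) (hp : p ∉ G) :
    G.foldl (pvNStep (p :: ps')) (b.map (· + 1))
      = (G.foldl (pvNStep ps') b).map (· + 1) := by
  induction G generalizing b with
  | nil => rfl
  | cons x G ih =>
    have hx : p ≠ x := fun h => hp (h ▸ List.mem_cons_self)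
    have hG : p ∉ G := fun h => hp (List.mem_cons_of_mem _ h)
    simp only [List.foldl]
    have hstep : pvNStep (p :: ps') (b.map (· + 1)) x = (pvNStep ps' b x).map (· + 1) := by
      unfold pvNStep
      conv_lhs => rw [pvIdxN, if_neg hx]
      cases pvIdxN ps' x with
      | none => cases b <;> rfl
      | some i =>
        cases b with
        | none => rfl
        | some j =>
          simp only [Option.map]
          by_cases hij : i < j
          · rw [if_pos hij, if_pos (by omega)]
          · rw [if_neg hij, if_neg (by omega)]
    rw [hstep, ih _ hG]

theorem pvKey (ps G : List String) :
    pvFirstIn ps G = pvFinish ps (G.foldl (pvNStep ps) none) := by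
  induction ps generalizing G with
  | nil => rw [pvNFold_nil]; rfl
  | cons p ps' ih =>
    by_cases hp : p ∈ G
    · rw [pvNFold_zero p ps' G none hp]
      simp [pvFirstIn, hp, pvFinish]
    · have hshift := pvNFold_shift p ps' G none hp
      simp only [Option.map] at hshift
      rw [hshift]
      simp only [pvFirstIn, if_neg hp, ih]
      cases G.foldl (pvNStep ps') none with
      | none => rfl
      | some n => simp [pvFinish]

theorem pvIdxN_lt (ps : List String) (s : String) (n : Nat) (h : pvIdxN ps s = some n) :
    n < ps.length := by
  induction ps generalizing n with
  | nil => cases h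
  | cons p rest ih =>
    unfold pvIdxN at h
    split_ifs at h with hps
    · cases h; simp
    · cases hr : pvIdxN rest s with
      | none => rw [hr] at h; cases h
      | some m =>
        rw [hr] at h
        cases h
        have := ih m hr
        simp; omega

theorem pvNFold_lt (ps G : List String) (b : Option Nat)
    (hb : ∀ n, b = some n → n < ps.length) :
    ∀ n, G.foldl (pvNStep ps) b = some n → n < ps.length := by
  induction G generalizing b with
  | nil => exact hb
  | cons x G ih =>
    intro n hn
    refine ih _ ?_ n hn
    intro m hm
    unfold pvNStep at hm
    cases hi : pvIdxN ps x with
    | none => rw [hi] at hm; exact hb m hm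
    | some i =>
      rw [hi] at hm
      cases b with
      | none => cases hm; exact pvIdxN_lt ps x m hi
      | some j =>
        have hj := hb j rfl
        have hi' := pvIdxN_lt ps x i hi
        have hm' : (if i < j then some i else some j) = some m := hm
        split_ifs at hm' <;> (cases hm'; omega)

-- ===== VERDICT (by name: the statement is the Claim_ definition above) =====
theorem pick_category_group_py_spec : Claim_equal_pick_category_group_py := by
  intro use_codes category_map _
  unfold Spec_pick_category_group_py
  show pvALoop pvPriority
      (PySem.Set.ofList (use_codes.map (fun uc => PySem.Dict.getD ⟨category_map⟩ uc "other")))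
    = pick_category_group_py_alt use_codes category_map
  rw [pvALoop_eq_firstIn, pvKey]
  unfold pick_category_group_py_alt
  have hB := pvBFold_eq_cast category_map use_codes none
  rw [show (Option.map Int.ofNat (none : Option Nat)) = none from rfl] at hB
  rw [hB]
  cases hf : (use_codes.map (fun uc => PySem.Dict.getD ⟨category_map⟩ uc "other")).foldl
      (pvNStep pvPriority) none with
  | none => rfl
  | some n =>
    have hn : n < pvPriority.length :=
      pvNFold_lt pvPriority _ none (by intro _ h; cases h) n hf
    have hv : pvPriority[n]? = some (pvPriority[n]'hn) :=
      List.getElem?_eq_some_iff.mpr ⟨hn, rfl⟩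
    have hg : PySem.List.pyGet? pvPriority (Int.ofNat n) = pvPriority[n]? :=
      PySem.List.pyGet?_natCast pvPriority n
    simp only [Option.map_some, pvFinish, hv, hg]
    rfl
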